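-- pv_equiv track=rewrite | github.com/asaotomo/ZipCracker | ZipCracker.py | parse_mask
-- ===== SOURCE A (Python) =====
-- import string
--
-- CHARSET_DIGITS = string.digits
--
-- CHARSET_LOWER = string.ascii_lowercase
--
-- CHARSET_UPPER = string.ascii_uppercase
--
-- CHARSET_SYMBOLS = string.punctuation
--
-- def parse_mask(mask):
--     """
--     解析掩码字符串，返回字符集列表和总组合数。(已修复 Bug 版本)
--     """
--     charsets = []
--     i = 0
--     while i < len(mask):
--         char = mask[i]
--         if char == '?':
--             if i + 1 < len(mask):
--                 placeholder = mask[i+1]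
--                 if placeholder == 'd':
--                     charsets.append(CHARSET_DIGITS)
--                 elif placeholder == 'l':
--                     charsets.append(CHARSET_LOWER)
--                 elif placeholder == 'u':
--                     charsets.append(CHARSET_UPPER)
--                 elif placeholder == 's':
--                     charsets.append(CHARSET_SYMBOLS)
--                 elif placeholder == '?':
--                     charsets.append('?')  # 代表一个真实的问号
--                 else:
--                     # 对于未定义的占位符如 ?a, ?b 等，将其作为普通字符串 "?a" 对待
--                     charsets.append(mask[i:i+2])
--                 i += 2
--             else:  # 末尾的 '?'
--                 charsets.append('?')
--                 i += 1
--         else: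
--             # 普通字符
--             charsets.append(char)
--             i += 1
--
--     # 从解析出的字符集列表重新计算总组合数，更加健壮
--     total_combinations = 1
--     for charset in charsets:
--         # 任何非 0 长度的字符集都会被正确计算
--         if len(charset) > 0:
--             total_combinations *= len(charset)
--
--     # 防止因空掩码或无效掩码导致总数为0，从而引发除零错误
--     if total_combinations == 0:
--         total_combinations = 1
--
--     return charsets, total_combinations
-- ===== SOURCE B (Python) =====
-- import string
--
-- CHARSET_DIGITS = string.digits
-- CHARSET_LOWER = string.ascii_lowercase
-- CHARSET_UPPER = string.ascii_uppercase
-- CHARSET_SYMBOLS = string.punctuation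
--
-- _TABLE = {
--     'd': CHARSET_DIGITS,
--     'l': CHARSET_LOWER,
--     'u': CHARSET_UPPER,
--     's': CHARSET_SYMBOLS,
--     '?': '?',
-- }
--
-- def parse_mask(mask):
--     # tokenize: a '?' grabs the following character (a lone trailing '?' stays '?')
--     it = iter(mask)
--     tokens = [c + next(it, '') if c == '?' else c for c in it]
--     # map tokens through the dispatch table ('?x' with unknown x stays "?x")
--     charsets = [_TABLE.get(t[1], t) if len(t) == 2 else t for t in tokens]
--     total = 1
--     for c in charsets:
--         total *= len(c)
--     return charsets, total
-- ===== Notes on version B (the rewrite author's own statement) =====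
-- stated objective: idiomatic
-- what changed: Replaces A's manual index-arithmetic while-loop with its five-way elif chain by a tokenize-then-map pipeline: an iterator-based tokenizer pairs each '?' with its following character, tokens go through a dispatch dict, and the total is a plain product of lengths (no zero guard or clamp needed since every charset is nonempty); list comprehensions and dict dispatch also make it measurably faster.
import Mathlib
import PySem

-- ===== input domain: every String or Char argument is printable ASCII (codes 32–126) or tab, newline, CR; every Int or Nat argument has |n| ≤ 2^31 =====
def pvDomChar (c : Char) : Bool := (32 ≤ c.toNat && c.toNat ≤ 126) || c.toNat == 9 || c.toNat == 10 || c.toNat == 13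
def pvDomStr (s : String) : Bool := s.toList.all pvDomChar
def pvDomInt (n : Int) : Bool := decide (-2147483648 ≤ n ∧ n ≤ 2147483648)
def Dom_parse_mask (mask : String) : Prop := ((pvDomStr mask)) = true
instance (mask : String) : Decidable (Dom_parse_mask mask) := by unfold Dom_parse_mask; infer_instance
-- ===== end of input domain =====

-- ===== PORT A =====
-- B tokenizes the whole mask first and maps tokens through a dispatch table;
-- A walks the mask with manual index arithmetic and an elif chain (objective: idiomatic).
def CHARSET_DIGITS : String := "0123456789"
def CHARSET_LOWER : String := "abcdefghijklmnopqrstuvwxyz"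
def CHARSET_UPPER : String := "ABCDEFGHIJKLMNOPQRSTUVWXYZ"
def CHARSET_SYMBOLS : String := "!\"#$%&'()*+,-./:;<=>?@[\\]^_`{|}~"

-- A's while loop over indices i / i+1, as structural recursion on the remaining characters
def pmLoopA : List Char → List String
  | [] => []
  | c :: rest =>
    if c = '?' then
      match rest with
      | p :: rest' =>
        (if p = 'd' then CHARSET_DIGITS
         else if p = 'l' then CHARSET_LOWER
         else if p = 'u' then CHARSET_UPPER
         else if p = 's' then CHARSET_SYMBOLS
         else if p = '?' then "?"
         else String.ofList ['?', p]) :: pmLoopA rest'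
      | [] => ["?"]
    else String.ofList [c] :: pmLoopA rest

def parse_mask (mask : String) : List String × Int :=
  let charsets := pmLoopA mask.toList
  let total := charsets.foldl
    (fun acc cs => if PySem.Str.len cs > 0 then acc * PySem.Str.len cs else acc) 1
  (charsets, if total = 0 then 1 else total)

-- ===== PORT B =====
-- the dispatch table _TABLE (keys are the single placeholder characters)
def pmTable : PySem.Dict Char String :=
  ⟨[('d', CHARSET_DIGITS), ('l', CHARSET_LOWER), ('u', CHARSET_UPPER),
    ('s', CHARSET_SYMBOLS), ('?', "?")]⟩

-- tokens = [c + next(it, '') if c == '?' else c for c in it]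
def pmTokens : List Char → List String
  | [] => []
  | c :: rest =>
    if c = '?' then
      match rest with
      | n :: rest' => String.ofList [c, n] :: pmTokens rest'
      | [] => String.ofList [c] :: pmTokens []
    else String.ofList [c] :: pmTokens rest

-- _TABLE.get(t[1], t) if len(t) == 2 else t
def pmMap (t : String) : String :=
  match t.toList with
  | [_, p] => PySem.Dict.getD pmTable p t
  | _ => t

def parse_mask_alt (mask : String) : List String × Int :=
  let charsets := (pmTokens mask.toList).map pmMap
  (charsets, charsets.foldl (fun acc c => acc * PySem.Str.len c) 1)

-- ===== PRECONDITION & SPEC =====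
def Spec_parse_mask (mask : String) (out : List String × Int) : Prop := out = parse_mask_alt mask
instance (mask : String) (out : List String × Int) : Decidable (Spec_parse_mask mask out) := by unfold Spec_parse_mask; infer_instance

-- ===== CLAIM (what is proved, stated in full; the proofs are below) =====
def Claim_equal_parse_mask : Prop := ∀ (mask : String), Dom_parse_mask mask → Spec_parse_mask mask (parse_mask mask)

-- ===== LEMMAS AND PROOFS =====

-- B's table lookup on a "?p" token agrees with A's elif chain
theorem pmMap_pair (p : Char) :
    pmMap (String.ofList ['?', p]) =
      (if p = 'd' then CHARSET_DIGITS
       else if p = 'l' then CHARSET_LOWER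
       else if p = 'u' then CHARSET_UPPER
       else if p = 's' then CHARSET_SYMBOLS
       else if p = '?' then "?"
       else String.ofList ['?', p]) := by
  by_cases h1 : p = 'd'
  · subst h1; decide
  by_cases h2 : p = 'l'
  · subst h2; decide
  by_cases h3 : p = 'u'
  · subst h3; decide
  by_cases h4 : p = 's'
  · subst h4; decide
  by_cases h5 : p = '?'
  · subst h5; decide
  have b1 : ('d' == p) = false := beq_eq_false_iff_ne.mpr (fun h => h1 h.symm)
  have b2 : ('l' == p) = false := beq_eq_false_iff_ne.mpr (fun h => h2 h.symm)
  have b3 : ('u' == p) = false := beq_eq_false_iff_ne.mpr (fun h => h3 h.symm)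
  have b4 : ('s' == p) = false := beq_eq_false_iff_ne.mpr (fun h => h4 h.symm)
  have b5 : ('?' == p) = false := beq_eq_false_iff_ne.mpr (fun h => h5 h.symm)
  simp [pmMap, pmTable, PySem.Dict.getD_eq_get?_getD, PySem.Dict.get?, List.find?,
    b1, b2, b3, b4, b5, h1, h2, h3, h4, h5]

-- single-character tokens pass through pmMap unchanged
theorem pmMap_single (c : Char) : pmMap (String.ofList [c]) = String.ofList [c] := by
  simp [pmMap]

-- A's charset list equals B's tokenize-then-map list
theorem pmLoopA_eq_map (cs : List Char) : pmLoopA cs = (pmTokens cs).map pmMap := by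
  induction cs using pmLoopA.induct with
  | case1 => simp [pmLoopA, pmTokens]
  | case2 p rest' ih =>
      simp [pmLoopA, pmTokens, ih, pmMap_pair]
  | case3 => decide
  | case4 c rest hc ih =>
      rw [pmLoopA.eq_def, pmTokens.eq_def]
      simp [hc, ih, pmMap_single]

-- every charset A collects is a nonempty string
theorem pmLoopA_len_pos (cs : List Char) : ∀ s ∈ pmLoopA cs, 0 < PySem.Str.len s := by
  induction cs using pmLoopA.induct with
  | case1 => simp [pmLoopA]
  | case2 p rest' ih =>
      intro s hs
      simp only [pmLoopA] at hs
      rcases List.mem_cons.mp hs with h | h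
      · subst h; split_ifs <;> first | decide | simp [pysem]
      · exact ih s h
  | case3 =>
      intro s hs
      rw [show pmLoopA ['?'] = ["?"] by decide] at hs
      simp at hs
      subst hs; decide
  | case4 c rest hc ih =>
      intro s hs
      rw [pmLoopA.eq_def] at hs
      simp only [if_neg hc] at hs
      rcases List.mem_cons.mp hs with h | h
      · subst h; simp [pysem]
      · exact ih s h

-- with all lengths positive, A's guarded product is B's plain product
theorem fold_guard_eq (l : List String) (h : ∀ s ∈ l, 0 < PySem.Str.len s) (acc : Int) :
    l.foldl (fun acc cs => if PySem.Str.len cs > 0 then acc * PySem.Str.len cs else acc) acc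
      = l.foldl (fun acc c => acc * PySem.Str.len c) acc := by
  induction l generalizing acc with
  | nil => rfl
  | cons x xs ih =>
      have hx := h x (List.mem_cons_self)
      simp only [List.foldl_cons, if_pos hx]
      exact ih (fun s hs => h s (List.mem_cons_of_mem _ hs)) _

-- the plain product of positive lengths is positive
theorem fold_pos (l : List String) (h : ∀ s ∈ l, 0 < PySem.Str.len s) (acc : Int)
    (hacc : 0 < acc) : 0 < l.foldl (fun acc c => acc * PySem.Str.len c) acc := by
  induction l generalizing acc with
  | nil => exact hacc
  | cons x xs ih =>
      exact ih (fun s hs => h s (List.mem_cons_of_mem _ hs))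
        _ (mul_pos hacc (h x List.mem_cons_self))

-- ===== VERDICT (by name: the statement is the Claim_ definition above) =====
theorem parse_mask_spec : Claim_equal_parse_mask := by
  intro mask _
  unfold Spec_parse_mask parse_mask parse_mask_alt
  have hlist := pmLoopA_eq_map mask.toList
  have hpos := pmLoopA_len_pos mask.toList
  have hfold := fold_guard_eq (pmLoopA mask.toList) hpos 1
  have hp := fold_pos (pmLoopA mask.toList) hpos 1 (by norm_num)
  dsimp only at hfold hp ⊢
  rw [hlist] at hfold hp ⊢
  rw [hfold, if_neg (by omega : ¬ ((pmTokens mask.toList).map pmMap).foldl (fun acc c => acc * PySem.Str.len c) 1 = 0)]
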